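-- pv_equiv track=rewrite | github.com/miliar/Code_Jam_Webscraper | solutions_python/Problem_156/522.py | findleast
-- ===== SOURCE A (Python) =====
-- import copy
--
-- def splitbiggest(lst):
--     l = copy.deepcopy(lst)
--     big = max(l)
--     num = l.count(big)
--     for x in range(0, num):
--         l.remove(big)
--         l.append(big//2)
--         l.append(big - big//2)
--     return l
--
-- def findleast(l):
--
--     big = max(l)
--
--     if big <= 3:
--         return big
--
--     num = l.count(big)
--
--     trial = num + findleast(splitbiggest(l))
--
--     if trial < big:
--         return trial
--     else:
--         return big
--
-- x = 2
-- ===== SOURCE B (Python) =====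
-- def findleast(l):
--     # One descending sweep over pile sizes with a multiset counter:
--     # each value v >= 4 present is one "split all biggest piles" round;
--     # take the min over stopping points of (splits so far + current max).
--     cnt = {}
--     for a in l:
--         cnt[a] = cnt.get(a, 0) + 1
--     splits = 0
--     best = None
--     v = max(l)
--     stop = min(min(l), 2)
--     while v >= stop:
--         c = cnt.get(v, 0)
--         if c:
--             cand = splits + v
--             if best is None or cand < best:
--                 best = cand
--             if v <= 3:
--                 break
--             splits += c
--             lo = v // 2
--             hi = v - lo
--             cnt[lo] = cnt.get(lo, 0) + c
--             cnt[hi] = cnt.get(hi, 0) + c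
--         v -= 1
--     return best
-- ===== Notes on version B (the rewrite author's own statement) =====
-- stated objective: faster
-- what changed: Replaces A's recursion that deep-copies the whole pile list and splits all biggest piles each level with a single descending sweep over pile sizes using a multiset counter, taking the min of (splits so far + current max) over stopping points.
import Mathlib
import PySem

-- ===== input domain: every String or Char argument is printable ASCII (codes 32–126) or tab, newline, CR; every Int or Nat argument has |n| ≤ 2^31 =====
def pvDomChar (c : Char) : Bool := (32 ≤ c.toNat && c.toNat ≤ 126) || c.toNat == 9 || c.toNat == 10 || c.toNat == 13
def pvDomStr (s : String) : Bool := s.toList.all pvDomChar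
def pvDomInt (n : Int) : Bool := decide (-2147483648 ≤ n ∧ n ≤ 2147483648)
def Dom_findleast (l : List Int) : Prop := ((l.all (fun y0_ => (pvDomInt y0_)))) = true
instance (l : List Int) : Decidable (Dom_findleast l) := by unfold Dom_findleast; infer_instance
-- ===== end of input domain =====

-- B replaces A's deep-copying split-the-biggest recursion by one descending sweep over
-- pile sizes with a multiset counter (objective: faster).

-- ===== PORT A =====
-- body of A's 'for x in range(0, num)' loop: remove one 'big', append its two halves
def splitstep (big : Int) (l : List Int) : List Int :=
  (match PySem.List.remove? l big with
   | some r => r          -- l.remove(big)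
   | none => l) ++         -- ValueError branch; unreachable: big is always present
  [PySem.Int.floordiv big 2] ++ [big - PySem.Int.floordiv big 2]

def splitbiggest (lst : List Int) : List Int :=
  match PySem.List.max? lst (fun x => x) with
  | none => lst            -- Python raises ValueError (max of empty); only reachable for lst = []
  | some big =>
    (PySem.List.pyRange 0 ((PySem.List.count lst big : Nat) : Int) 1).foldl
      (fun s _ => splitstep big s) lst

-- A's recursion, with a fuel bound: max(l) strictly decreases on each recursive call
-- (proved in findleastGo_fuel below), so fuel max(l)+1 never runs out on the inputs A accepts.
def findleastGo : Nat → List Int → Int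
  | 0, _l => 0             -- fuel exhausted: unreachable (see findleastGo_fuel)
  | (fuel+1), l =>
    match PySem.List.max? l (fun x => x) with
    | none => 0            -- Python raises ValueError on the empty list; excluded by Pre_
    | some big =>
      if big ≤ 3 then big
      else
        let num : Int := (PySem.List.count l big : Nat)
        let trial := num + findleastGo fuel (splitbiggest l)
        if trial < big then trial else big

def findleast (l : List Int) : Int :=
  findleastGo (((PySem.List.max? l (fun x => x)).getD 0).toNat + 1) l

-- ===== PORT B =====
-- the 'while v >= stop' loop of B, with its early 'break' at the first value ≤ 3;
-- fuel = number of remaining loop iterations, (v + 1 - stop).toNat at the call site,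
-- so fuel 0 is exactly the loop condition v < stop failing.
def bloop : Nat → PySem.Dict Int Int → Int → Option Int → Int → Int → Option Int
  | 0, _cnt, _splits, best, _v, _stop => best
  | (fuel+1), cnt, splits, best, v, stop =>
    let c := cnt.getD v 0
    if c ≠ 0 then
      let cand := splits + v
      let best' := match best with
        | none => some cand
        | some b => if cand < b then some cand else some b
      if v ≤ 3 then best'    -- break
      else
        let lo := PySem.Int.floordiv v 2
        let hi := v - lo
        let cnt' := cnt.insert lo (cnt.getD lo 0 + c)
        let cnt'' := cnt'.insert hi (cnt'.getD hi 0 + c)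
        bloop fuel cnt'' (splits + c) best' (v - 1) stop
    else bloop fuel cnt splits best (v - 1) stop

def findleast_alt (l : List Int) : Int :=
  match PySem.List.max? l (fun x => x) with
  | none => 0              -- Python raises ValueError on the empty list; excluded by Pre_
  | some mx =>
    match PySem.List.min? l (fun x => x) with
    | none => 0            -- unreachable: l is nonempty here
    | some mn =>
      let cnt := l.foldl (fun d a => d.insert a (d.getD a 0 + 1)) PySem.Dict.empty
      (bloop (mx + 1 - min mn 2).toNat cnt 0 none mx (min mn 2)).getD 0
      -- best is never None for nonempty l

-- ===== PRECONDITION & SPEC =====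
-- Pre_ excludes only the empty list, on which Python's max() raises ValueError in both A and B.
def Pre_findleast (l : List Int) : Prop := l ≠ []
instance (l : List Int) : Decidable (Pre_findleast l) := by unfold Pre_findleast; infer_instance
def pvWitness_findleast : List Int := [9]
def Spec_findleast (l : List Int) (out : Int) : Prop := out = findleast_alt l
instance (l : List Int) (out : Int) : Decidable (Spec_findleast l out) := by
  unfold Spec_findleast; infer_instance

-- ===== CLAIM (what is proved, stated in full; the proofs are below) =====
def Claim_equal_findleast : Prop :=
  ∀ (l : List Int), Dom_findleast l → Pre_findleast l → Spec_findleast l (findleast l)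

-- ===== LEMMAS AND PROOFS =====
theorem pvfd (a : Int) : PySem.Int.floordiv a 2 = a / 2 :=
  PySem.Int.floordiv_eq_ediv_of_pos (by norm_num)

theorem pv_foldl_const {α β : Type} (g : α → α) (xs : List β) (init : α) :
    xs.foldl (fun s _ => g s) init = g^[xs.length] init := by
  induction xs generalizing init with
  | nil => rfl
  | cons x t ih =>
    simp only [List.foldl_cons, List.length_cons]
    rw [ih, Function.iterate_succ_apply]

theorem pv_split_eq_iterate (lst : List Int) (big : Int)
    (h : PySem.List.max? lst (fun x => x) = some big) :
    splitbiggest lst = (splitstep big)^[PySem.List.count lst big] lst := by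
  have h1 : splitbiggest lst
      = (PySem.List.pyRange 0 ((PySem.List.count lst big : Nat) : Int) 1).foldl
          (fun s _ => splitstep big s) lst := by
    unfold splitbiggest
    rw [h]
  rw [h1, pv_foldl_const (splitstep big)]
  congr 1
  simp [PySem.List.length_pyRange_one]

theorem pv_iter_count (big : Int) (h4 : 4 ≤ big) :
    ∀ (k : Nat) (s : List Int), k ≤ s.count big → ∀ w : Int,
      ((splitstep big)^[k] s).count w
        = (if w = big then s.count big - k else s.count w)
          + k * ((if w = PySem.Int.floordiv big 2 then 1 else 0)
               + (if w = big - PySem.Int.floordiv big 2 then 1 else 0)) := by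
  intro k
  induction k with
  | zero =>
    intro s hk w
    by_cases hwb : w = big
    · subst hwb
      simp
    · simp [hwb]
  | succ k ih =>
    intro s hk w
    simp only [pvfd] at ih ⊢
    have hmem : big ∈ s := List.count_pos_iff.mp (by omega)
    rw [Function.iterate_succ_apply]
    have hstep : splitstep big s = s.erase big ++ [big / 2] ++ [big - big / 2] := by
      unfold splitstep
      rw [PySem.List.remove?_eq_some_erase s big hmem]
      simp [pvfd]
    rw [hstep]
    have hcnt : ∀ u : Int, (s.erase big ++ [big / 2] ++ [big - big / 2]).count u
        = (if u = big then s.count big - 1 else s.count u)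
          + ((if u = big / 2 then 1 else 0) + (if u = big - big / 2 then 1 else 0)) := by
      intro u
      by_cases hub : u = big
      · subst hub
        simp only [List.count_append, List.count_cons, List.count_nil,
          List.count_erase_self, beq_iff_eq]
        split_ifs <;> omega
      · simp only [List.count_append, List.count_cons, List.count_nil,
          List.count_erase_of_ne hub, beq_iff_eq]
        split_ifs <;> omega
    have hk' : k ≤ (s.erase big ++ [big / 2] ++ [big - big / 2]).count big := by
      rw [hcnt big]
      split_ifs <;> omega
    by_cases hwb : w = big
    · subst hwb
      rw [ih _ hk' w, hcnt w]
      split_ifs <;> omega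
    · rw [ih _ hk' w, hcnt w, hcnt big]
      split_ifs <;> omega

theorem pv_splitstep_mem (big x : Int) (s : List Int) (hx : x ∈ splitstep big s) :
    x ∈ s ∨ x = PySem.Int.floordiv big 2 ∨ x = big - PySem.Int.floordiv big 2 := by
  unfold splitstep at hx
  rcases List.mem_append.mp hx with h1 | h1
  · rcases List.mem_append.mp h1 with h2 | h2
    · left
      rcases h' : PySem.List.remove? s big with _ | r
      · simp only [h'] at h2
        exact h2
      · simp only [h'] at h2
        have hmem : big ∈ s := by
          by_contra hn
          rw [(PySem.List.remove?_eq_none_iff s big).mpr hn] at h'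
          cases h'
        have he := PySem.List.remove?_eq_some_erase s big hmem
        rw [h'] at he
        injection he with he
        subst he
        exact List.mem_of_mem_erase h2
    · right; left
      simpa using h2
  · right; right
    simpa using h1

theorem pv_iter_mem (big : Int) :
    ∀ (k : Nat) (s : List Int) (x : Int), x ∈ (splitstep big)^[k] s →
      x ∈ s ∨ x = PySem.Int.floordiv big 2 ∨ x = big - PySem.Int.floordiv big 2 := by
  intro k
  induction k with
  | zero =>
    intro s x hx
    exact Or.inl hx
  | succ k ih =>
    intro s x hx
    rw [Function.iterate_succ_apply] at hx
    rcases ih _ x hx with hx' | hx' | hx'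
    · exact pv_splitstep_mem big x s hx'
    · exact Or.inr (Or.inl hx')
    · exact Or.inr (Or.inr hx')

theorem pv_split_count (l : List Int) (big : Int)
    (hm : PySem.List.max? l (fun x => x) = some big) (h4 : 4 ≤ big) (w : Int) :
    (splitbiggest l).count w
      = (if w = big then 0 else l.count w)
        + l.count big * ((if w = PySem.Int.floordiv big 2 then 1 else 0)
                       + (if w = big - PySem.Int.floordiv big 2 then 1 else 0)) := by
  rw [pv_split_eq_iterate l big hm, PySem.List.count_eq,
    pv_iter_count big h4 (l.count big) l le_rfl w]
  split_ifs <;> omega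

theorem pv_split_mem (l : List Int) (big : Int)
    (hm : PySem.List.max? l (fun x => x) = some big) (x : Int)
    (hx : x ∈ splitbiggest l) :
    x ∈ l ∨ x = PySem.Int.floordiv big 2 ∨ x = big - PySem.Int.floordiv big 2 := by
  rw [pv_split_eq_iterate l big hm] at hx
  exact pv_iter_mem big _ l x hx

theorem pv_max_split_lt (l : List Int) (big : Int)
    (hm : PySem.List.max? l (fun x => x) = some big) (h4 : 4 ≤ big) :
    ∃ b', PySem.List.max? (splitbiggest l) (fun x => x) = some b' ∧ 2 ≤ b' ∧ b' < big := by
  have hmem : big ∈ l := PySem.List.max?_mem hm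
  have hcnt : 0 < l.count big := List.count_pos_iff.mpr hmem
  have hlo : PySem.Int.floordiv big 2 ∈ splitbiggest l := by
    apply List.count_pos_iff.mp
    rw [pv_split_count l big hm h4]
    simp only [pvfd]
    split_ifs <;> omega
  rcases hmax : PySem.List.max? (splitbiggest l) (fun x => x) with _ | b'
  · rw [PySem.List.max?_eq_none_iff] at hmax
    rw [hmax] at hlo
    exact absurd hlo (List.not_mem_nil)
  · refine ⟨b', rfl, ?_, ?_⟩
    · have h1 := PySem.List.max?_isMax hmax _ hlo
      simp only [pvfd] at h1
      omega
    · have hb'mem : b' ∈ splitbiggest l := PySem.List.max?_mem hmax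
      rcases pv_split_mem l big hm b' hb'mem with h | h | h
      · have hle := PySem.List.max?_isMax hm _ h
        simp only at hle
        have hnbig : (splitbiggest l).count big = 0 := by
          rw [pv_split_count l big hm h4]
          simp only [pvfd]
          split_ifs <;> omega
        have hne : b' ≠ big := by
          intro he
          subst he
          exact absurd (List.count_pos_iff.mpr hb'mem) (by omega)
        omega
      · rw [pvfd] at h
        omega
      · rw [pvfd] at h
        omega

theorem findleastGo_red (l : List Int) (big : Int)
    (hm : PySem.List.max? l (fun x => x) = some big) (k : Nat) :
    findleastGo (k+1) l = if big ≤ 3 then big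
      else if ((l.count big : Int) + findleastGo k (splitbiggest l)) < big
        then (l.count big : Int) + findleastGo k (splitbiggest l) else big := by
  simp only [findleastGo, hm, PySem.List.count_eq]

theorem findleastGo_fuel :
    ∀ (n m : Nat) (l : List Int) (big : Int),
      PySem.List.max? l (fun x => x) = some big → big.toNat < n → big.toNat < m →
      findleastGo n l = findleastGo m l := by
  intro n
  induction n with
  | zero =>
    intro m l big hm h1 h2
    omega
  | succ n ih =>
    intro m l big hm h1 h2
    cases m with
    | zero => omega
    | succ m =>
      rw [findleastGo_red l big hm n, findleastGo_red l big hm m]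
      by_cases h3 : big ≤ 3
      · rw [if_pos h3, if_pos h3]
      · rw [if_neg h3, if_neg h3]
        obtain ⟨b', hb', hb'2, hb'lt⟩ := pv_max_split_lt l big hm (by omega)
        rw [ih m (splitbiggest l) b' hb' (by omega) (by omega)]

theorem findleast_unfold (l : List Int) (big : Int)
    (hm : PySem.List.max? l (fun x => x) = some big) :
    findleast l = if big ≤ 3 then big
      else if ((l.count big : Int) + findleast (splitbiggest l)) < big
        then (l.count big : Int) + findleast (splitbiggest l) else big := by
  unfold findleast
  rw [hm]
  simp only [Option.getD_some]
  rw [findleastGo_red l big hm]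
  by_cases h3 : big ≤ 3
  · rw [if_pos h3, if_pos h3]
  · rw [if_neg h3, if_neg h3]
    obtain ⟨b', hb', hb'2, hb'lt⟩ := pv_max_split_lt l big hm (by omega)
    rw [hb']
    simp only [Option.getD_some]
    rw [findleastGo_fuel big.toNat (b'.toNat + 1) (splitbiggest l) b' hb' (by omega)
      (by omega)]

-- 'if best is None or cand < best' folded once: merge an optional best with a new candidate
def pvMergeMin : Option Int → Int → Int
  | none, x => x
  | some b, x => if x < b then x else b

theorem pvMergeMin_none (x : Int) : pvMergeMin none x = x := rfl

theorem pvMergeMin_some (b x : Int) : pvMergeMin (some b) x = if x < b then x else b := rfl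

theorem pv_bloop_spec :
    ∀ (n : Nat) (v stop : Int) (cnt : PySem.Dict Int Int) (splits : Int)
      (best : Option Int) (l : List Int) (big : Int),
      (v + 1 - stop).toNat = n →
      PySem.List.max? l (fun x => x) = some big →
      big ≤ v →
      stop ≤ 2 →
      (∀ x ∈ l, stop ≤ x) →
      (∀ w : Int, w ≤ v → cnt.getD w 0 = (l.count w : Int)) →
      bloop n cnt splits best v stop = some (pvMergeMin best (splits + findleast l)) := by
  intro n
  induction n with
  | zero =>
    intro v stop cnt splits best l big hfuel hm hbv hs2 hsl hinv
    exfalso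
    have hmem := PySem.List.max?_mem hm
    have := hsl big hmem
    omega
  | succ n ih =>
    intro v stop cnt splits best l big hfuel hm hbv hs2 hsl hinv
    have hmem := PySem.List.max?_mem hm
    have hsv : stop ≤ v := le_trans (hsl big hmem) hbv
    simp only [bloop]
    have hc : cnt.getD v 0 = (l.count v : Int) := hinv v le_rfl
    by_cases hc0 : l.count v = 0
    · have hne : ¬ (cnt.getD v 0 ≠ 0) := by
        rw [hc]
        omega
      rw [if_neg hne]
      have hbig_lt : big ≤ v - 1 := by
        rcases eq_or_lt_of_le hbv with he | hlt
        · exfalso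
          have : 0 < l.count v := by
            rw [← he]
            exact List.count_pos_iff.mpr hmem
          omega
        · omega
      exact ih (v-1) stop cnt splits best l big (by omega) hm hbig_lt hs2 hsl
        (fun w hw => hinv w (by omega))
    · have hvmem : v ∈ l := List.count_pos_iff.mp (by omega)
      have hveq : v = big :=
        le_antisymm (by simpa using PySem.List.max?_isMax hm v hvmem) hbv
      have hne : cnt.getD v 0 ≠ 0 := by
        rw [hc]
        omega
      rw [if_pos hne]
      by_cases h3 : v ≤ 3
      · rw [if_pos h3]
        have hfl : findleast l = v := by
          rw [findleast_unfold l big hm, if_pos (by omega), hveq]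
        rw [hfl]
        cases best with
        | none => simp [pvMergeMin_none]
        | some b =>
          simp only [pvMergeMin_some, Option.some.injEq]
          split_ifs <;> rfl
      · rw [if_neg h3]
        have h4 : (4:Int) ≤ v := by omega
        rcases hveq with rfl
        obtain ⟨b', hmax', hb'2, hb'lt⟩ := pv_max_split_lt l v hm h4
        have hinv' : ∀ w : Int, w ≤ v - 1 →
            ((cnt.insert (PySem.Int.floordiv v 2)
                (cnt.getD (PySem.Int.floordiv v 2) 0 + cnt.getD v 0)).insert
              (v - PySem.Int.floordiv v 2)
              ((cnt.insert (PySem.Int.floordiv v 2)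
                  (cnt.getD (PySem.Int.floordiv v 2) 0 + cnt.getD v 0)).getD
                (v - PySem.Int.floordiv v 2) 0 + cnt.getD v 0)).getD w 0
            = ((splitbiggest l).count w : Int) := by
          intro w hw
          rw [PySem.Dict.getD_insert, PySem.Dict.getD_insert, PySem.Dict.getD_insert,
            pv_split_count l v hm h4 w, hc,
            hinv (PySem.Int.floordiv v 2) (by rw [pvfd]; omega),
            hinv (v - PySem.Int.floordiv v 2) (by rw [pvfd]; omega),
            hinv w (by omega)]
          simp only [pvfd]
          push_cast
          by_cases hpar : v - v / 2 = v / 2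
          · rw [hpar]
            by_cases hwl : w = v / 2
            · subst hwl
              split_ifs <;> omega
            · split_ifs <;> omega
          · by_cases hw1 : w = v - v / 2
            · subst hw1
              split_ifs <;> omega
            · by_cases hw2 : w = v / 2
              · subst hw2
                split_ifs <;> omega
              · split_ifs <;> omega
        have hmem' : ∀ x ∈ splitbiggest l, stop ≤ x := by
          intro x hx
          rcases pv_split_mem l v hm x hx with h | h | h
          · exact hsl x h
          · rw [h, pvfd]
            omega
          · rw [h, pvfd]
            omega
        rw [ih (v-1) stop _ (splits + cnt.getD v 0) _ (splitbiggest l) b' (by omega)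
          hmax' (by omega) hs2 hmem' hinv']
        rw [findleast_unfold l v hm, if_neg h3, hc]
        cases best with
        | none =>
          simp [pvMergeMin_none, pvMergeMin_some]
          split_ifs <;> omega
        | some b =>
          simp [pvMergeMin_none, pvMergeMin_some]
          split_ifs <;> simp only [pvMergeMin_some] <;> split_ifs <;> omega

theorem findleast_spec : Claim_equal_findleast := by
  intro l _ hpre
  unfold Spec_findleast
  rcases hm : PySem.List.max? l (fun x => x) with _ | mx
  · exact absurd ((PySem.List.max?_eq_none_iff l _).mp hm) hpre
  rcases hmn : PySem.List.min? l (fun x => x) with _ | mn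
  · exact absurd ((PySem.List.min?_eq_none_iff l _).mp hmn) hpre
  unfold findleast_alt
  simp only [hm, hmn]
  have hinv : ∀ w : Int, w ≤ mx →
      (l.foldl (fun d a => d.insert a (d.getD a 0 + 1)) PySem.Dict.empty).getD w 0
        = (l.count w : Int) := by
    intro w _
    rw [PySem.Dict.getD_foldl_insert_add_one]
    simp
  have hsl : ∀ x ∈ l, min mn 2 ≤ x := fun x hx =>
    le_trans (min_le_left _ _) (by simpa using PySem.List.min?_isMin hmn x hx)
  rw [pv_bloop_spec (mx + 1 - min mn 2).toNat mx (min mn 2) _ 0 none l mx rfl hm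
    le_rfl (min_le_right _ _) hsl hinv]
  simp [pvMergeMin_none]
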